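-- pv_equiv track=rewrite | github.com/milavdabgar/milav-next | ai_voiceover_system/slidev_to_video.py | _get_image_for_segment
-- ===== SOURCE A (Python) =====
-- def _get_image_for_segment(slide_num, click_num, mapping):
--     if slide_num not in mapping:
--         return None
--
--     # Exact match
--     if click_num in mapping[slide_num]:
--         return mapping[slide_num][click_num]
--
--     # Fallback to nearest previous click
--     available = sorted(mapping[slide_num].keys())
--     prev = [c for c in available if c <= click_num]
--     if prev:
--         return mapping[slide_num][prev[-1]]
--
--     return None
-- ===== SOURCE B (Python) =====
-- def _get_image_for_segment(slide_num, click_num, mapping):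
--     clicks = mapping.get(slide_num)
--     if clicks is None:
--         return None
--     best = None
--     for c, img in clicks.items():
--         if c <= click_num and (best is None or best[0] < c):
--             best = (c, img)
--     return None if best is None else best[1]
-- ===== Notes on version B (the rewrite author's own statement) =====
-- stated objective: simpler
-- what changed: Replaces A's exact-match branch plus sort-and-filter fallback by a single fold over the items, tracking the best (key, value) pair with key <= click_num, so no sort, no candidate list and no second dict lookup.
import Mathlib
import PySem

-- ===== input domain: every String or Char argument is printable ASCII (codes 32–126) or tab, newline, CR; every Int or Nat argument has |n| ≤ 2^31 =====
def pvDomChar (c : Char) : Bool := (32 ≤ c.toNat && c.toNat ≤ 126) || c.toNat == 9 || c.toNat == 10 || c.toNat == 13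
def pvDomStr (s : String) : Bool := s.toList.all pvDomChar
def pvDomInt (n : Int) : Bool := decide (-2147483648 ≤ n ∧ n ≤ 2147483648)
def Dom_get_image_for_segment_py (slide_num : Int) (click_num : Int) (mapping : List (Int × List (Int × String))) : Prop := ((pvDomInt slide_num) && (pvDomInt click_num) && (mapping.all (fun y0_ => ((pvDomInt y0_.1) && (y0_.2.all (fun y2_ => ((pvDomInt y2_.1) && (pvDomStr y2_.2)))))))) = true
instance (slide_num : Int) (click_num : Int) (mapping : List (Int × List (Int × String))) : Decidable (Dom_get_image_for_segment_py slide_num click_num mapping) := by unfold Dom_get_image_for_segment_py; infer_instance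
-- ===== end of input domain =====

-- B replaces A's exact-match branch plus sort-and-filter fallback by one fold over the
-- items keeping the best (key, value) pair with key ≤ click_num (objective: simpler).

-- ===== PORT A =====
def get_image_for_segment_py (slide_num : Int) (click_num : Int) (mapping : List (Int × List (Int × String))) : Option String :=
  match (PySem.Dict.mk mapping).get? slide_num with
  | none => none                                   -- slide_num not in mapping
  | some inner =>
    let d := PySem.Dict.mk inner
    if d.contains click_num then d.get? click_num  -- exact match
    else
      let available := PySem.List.sorted d.keys (fun x => x) false
      let prev := available.filter (fun c => decide (c ≤ click_num))
      match prev.getLast? with                     -- prev[-1] if prev nonempty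
      | some p => d.get? p
      | none => none

-- ===== PORT B =====
-- loop body of Source B: update best when c ≤ click_num and best is None or best[0] < c
def pvBestStep (click_num : Int) (best : Option (Int × String)) (p : Int × String) : Option (Int × String) :=
  if decide (p.1 ≤ click_num) && (match best with | none => true | some b => decide (b.1 < p.1)) then some p else best

def get_image_for_segment_py_alt (slide_num : Int) (click_num : Int) (mapping : List (Int × List (Int × String))) : Option String :=
  match (PySem.Dict.mk mapping).get? slide_num with
  | none => none                                   -- clicks is None
  | some clicks =>
    match (PySem.Dict.mk clicks).items.foldl (pvBestStep click_num) none with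
    | none => none
    | some best => some best.2

-- ===== PRECONDITION & SPEC =====
def Spec_get_image_for_segment_py (slide_num : Int) (click_num : Int) (mapping : List (Int × List (Int × String))) (out : Option String) : Prop := out = get_image_for_segment_py_alt slide_num click_num mapping
instance (slide_num : Int) (click_num : Int) (mapping : List (Int × List (Int × String))) (out : Option String) : Decidable (Spec_get_image_for_segment_py slide_num click_num mapping out) := by unfold Spec_get_image_for_segment_py; infer_instance

-- ===== CLAIM (what is proved, stated in full; the proofs are below) =====
def Claim_equal_get_image_for_segment_py : Prop := ∀ (slide_num : Int) (click_num : Int) (mapping : List (Int × List (Int × String))), Dom_get_image_for_segment_py slide_num click_num mapping → Spec_get_image_for_segment_py slide_num click_num mapping (get_image_for_segment_py slide_num click_num mapping)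

-- ===== LEMMAS AND PROOFS =====

-- In a ≤-sorted Int list, the last element bounds every element.
theorem pv_getLast?_isMax (l : List Int) (hp : l.Pairwise (· ≤ ·)) (p : Int)
    (h : l.getLast? = some p) : ∀ y ∈ l, y ≤ p := by
  induction l with
  | nil => simp at h
  | cons a t ih =>
    cases t with
    | nil =>
      simp [List.getLast?] at h
      subst h; simp
    | cons b t' =>
      have hlast : (a :: b :: t').getLast? = (b :: t').getLast? := rfl
      rw [hlast] at h
      have hp' := (List.pairwise_cons.mp hp).2
      have ha := (List.pairwise_cons.mp hp).1
      have hmem : p ∈ b :: t' := List.mem_of_getLast? h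
      intro y hy
      rcases List.mem_cons.mp hy with rfl | hy'
      · exact le_trans (ha p hmem) (le_refl p)
      · exact ih hp' h y hy'

-- Invariant of Source B's loop: monotone best key; any result came from the list as a
-- first match on its key (or was the start value); every admissible key is bounded.
theorem pvBestStep_none {n : Int} {q : Int × String} (h : q.1 ≤ n) :
    pvBestStep n none q = some q := by simp [pvBestStep, h]

theorem pvBestStep_some_lt {n : Int} {b q : Int × String} (h : q.1 ≤ n) (h2 : b.1 < q.1) :
    pvBestStep n (some b) q = some q := by simp [pvBestStep, h, h2]

theorem pvBestStep_some_ge {n : Int} {b q : Int × String} (h2 : ¬ b.1 < q.1) :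
    pvBestStep n (some b) q = some b := by simp [pvBestStep, h2]

theorem pvBestStep_gt {n : Int} {acc : Option (Int × String)} {q : Int × String}
    (h : ¬ q.1 ≤ n) : pvBestStep n acc q = acc := by simp [pvBestStep, h]

-- Invariant of Source B's loop: monotone best key; any result came from the list as a
-- first match on its key (or was the start value); every admissible key is bounded.
theorem pvFold_spec (n : Int) (l : List (Int × String)) (acc : Option (Int × String)) :
    (∀ b, acc = some b → ∃ p, l.foldl (pvBestStep n) acc = some p ∧ b.1 ≤ p.1) ∧
    (∀ p, l.foldl (pvBestStep n) acc = some p →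
      acc = some p ∨ (p.1 ≤ n ∧ l.find? (fun q => q.1 == p.1) = some p ∧
                      (∀ b, acc = some b → b.1 < p.1))) ∧
    (∀ q ∈ l, q.1 ≤ n → ∃ p, l.foldl (pvBestStep n) acc = some p ∧ q.1 ≤ p.1) := by
  induction l generalizing acc with
  | nil => refine ⟨fun b hb => ⟨b, hb, le_refl _⟩, fun p hp => Or.inl hp, by simp⟩
  | cons a t ih =>
    obtain ⟨ih1, ih2, ih3⟩ := ih (pvBestStep n acc a)
    have hstep : ∀ b, pvBestStep n acc a = some b →
        (b = a ∧ a.1 ≤ n ∧ (∀ c, acc = some c → c.1 < a.1)) ∨ acc = some b := by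
      intro b hb
      by_cases han : a.1 ≤ n
      · cases hacc : acc with
        | none =>
          rw [hacc, pvBestStep_none han] at hb
          cases hb
          exact Or.inl ⟨rfl, han, fun c hc => by simp at hc⟩
        | some b0 =>
          by_cases hlt : b0.1 < a.1
          · rw [hacc, pvBestStep_some_lt han hlt] at hb
            cases hb
            exact Or.inl ⟨rfl, han, fun c hc => by cases hc; exact hlt⟩
          · rw [hacc, pvBestStep_some_ge hlt] at hb
            exact Or.inr hb
      · rw [pvBestStep_gt han] at hb
        exact Or.inr hb
    have hmono : ∀ b, acc = some b → ∃ b', pvBestStep n acc a = some b' ∧ b.1 ≤ b'.1 := by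
      intro b hb
      subst hb
      by_cases han : a.1 ≤ n
      · by_cases hlt : b.1 < a.1
        · exact ⟨a, pvBestStep_some_lt han hlt, le_of_lt hlt⟩
        · exact ⟨b, pvBestStep_some_ge hlt, le_refl _⟩
      · exact ⟨b, pvBestStep_gt han, le_refl _⟩
    refine ⟨?_, ?_, ?_⟩
    · intro b hb
      obtain ⟨b', hb', hle⟩ := hmono b hb
      obtain ⟨p, hp, hle'⟩ := ih1 b' hb'
      exact ⟨p, hp, le_trans hle hle'⟩
    · intro p hp
      rcases ih2 p hp with h1 | ⟨hpn, hfind, hlt⟩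
      · rcases hstep p h1 with ⟨rfl, han, hgt⟩ | hacc
        · exact Or.inr ⟨han, by simp [List.find?], hgt⟩
        · exact Or.inl hacc
      · have hane : a.1 ≠ p.1 := by
          intro he
          have hle : a.1 ≤ n := he ▸ hpn
          cases hacc : acc with
          | none =>
            have := hlt a (by rw [hacc, pvBestStep_none hle])
            omega
          | some b0 =>
            by_cases hb0 : b0.1 < a.1
            · have := hlt a (by rw [hacc, pvBestStep_some_lt hle hb0])
              omega
            · have := hlt b0 (by rw [hacc, pvBestStep_some_ge hb0])
              omega
        refine Or.inr ⟨hpn, ?_, ?_⟩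
        · have : (fun q : Int × String => q.1 == p.1) a = false := by simp [hane]
          simp [List.find?, this, hfind]
        · intro b hb
          obtain ⟨b', hb', hle⟩ := hmono b hb
          exact lt_of_le_of_lt hle (hlt b' hb')
    · intro q hq hqn
      rcases List.mem_cons.mp hq with rfl | hq'
      · have : ∃ b', pvBestStep n acc q = some b' ∧ q.1 ≤ b'.1 := by
          cases hacc : acc with
          | none => exact ⟨q, pvBestStep_none hqn, le_refl _⟩
          | some b0 =>
            by_cases hb0 : b0.1 < q.1
            · exact ⟨q, pvBestStep_some_lt hqn hb0, le_refl _⟩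
            · exact ⟨b0, pvBestStep_some_ge hb0, by omega⟩
        obtain ⟨b', hb', hle⟩ := this
        obtain ⟨p, hp, hle'⟩ := ih1 b' hb'
        exact ⟨p, hp, le_trans hle hle'⟩
      · exact ih3 q hq' hqn

-- Both inner computations equal "look up the largest key ≤ click_num, if any".
-- (the canonical value both reduce to)
def pvCanon (click_num : Int) (clicks : List (Int × String)) : Option String :=
  match PySem.List.max? ((PySem.Dict.mk clicks).keys.filter (fun c => decide (c ≤ click_num))) (fun x => x) with
  | none => none
  | some m => (PySem.Dict.mk clicks).get? m

theorem pvA_inner (click_num : Int) (clicks : List (Int × String)) :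
    (let d := PySem.Dict.mk clicks
     if d.contains click_num then d.get? click_num
     else
       let available := PySem.List.sorted d.keys (fun x => x) false
       let prev := available.filter (fun c => decide (c ≤ click_num))
       match prev.getLast? with
       | some p => d.get? p
       | none => none) = pvCanon click_num clicks := by
  simp only [pvCanon]
  set d := PySem.Dict.mk clicks with hd
  set cands := d.keys.filter (fun c => decide (c ≤ click_num)) with hcands
  by_cases hc : d.contains click_num = true
  · have hk : click_num ∈ d.keys := (PySem.Dict.contains_iff_mem_keys d click_num).mp hc
    have hmemc : click_num ∈ cands := by
      rw [hcands]; exact List.mem_filter.mpr ⟨hk, by simp⟩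
    have hne : cands ≠ [] := fun h => by simp [h] at hmemc
    obtain ⟨m, hm⟩ : ∃ m, PySem.List.max? cands (fun x => x) = some m := by
      cases h : PySem.List.max? cands (fun x => x) with
      | none => exact absurd ((PySem.List.max?_eq_none_iff _ _).mp h) hne
      | some m => exact ⟨m, rfl⟩
    have hmm : m ∈ cands := PySem.List.max?_mem hm
    have hmle : m ≤ click_num := by
      have := List.mem_filter.mp (hcands ▸ hmm)
      simpa using this.2
    have hcm : click_num ≤ m := PySem.List.max?_isMax hm click_num hmemc
    have : m = click_num := le_antisymm hmle hcm
    simp [hc, hm, this]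
  · rw [if_neg hc]
    set prev := (PySem.List.sorted d.keys (fun x => x) false).filter (fun c => decide (c ≤ click_num)) with hprev
    have hperm : prev.Perm cands := (PySem.List.sorted_perm d.keys (fun x => x) false).filter _
    have hpw : prev.Pairwise (· ≤ ·) := by
      exact List.Pairwise.filter _ (PySem.List.sorted_pairwise (xs := d.keys) (key := fun x => x))
    cases hl : prev.getLast? with
    | none =>
      have : prev = [] := List.getLast?_eq_none_iff.mp hl
      have hce : cands = [] := List.Perm.eq_nil (this ▸ hperm.symm)
      simp [hce, PySem.List.max?]
    | some p =>
      have hpm : p ∈ prev := List.mem_of_getLast? hl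
      have hpc : p ∈ cands := hperm.mem_iff.mp hpm
      have hne : cands ≠ [] := fun h => by simp [h] at hpc
      obtain ⟨m, hm⟩ : ∃ m, PySem.List.max? cands (fun x => x) = some m := by
        cases h : PySem.List.max? cands (fun x => x) with
        | none => exact absurd ((PySem.List.max?_eq_none_iff _ _).mp h) hne
        | some m => exact ⟨m, rfl⟩
      have hmm : m ∈ cands := PySem.List.max?_mem hm
      have hmp : m ∈ prev := hperm.mem_iff.mpr hmm
      have h1 : m ≤ p := pv_getLast?_isMax prev hpw p hl m hmp
      have h2 : p ≤ m := PySem.List.max?_isMax hm p hpc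
      have : p = m := le_antisymm h2 h1
      simp [hm, this]

theorem pvB_inner (click_num : Int) (clicks : List (Int × String)) :
    (match (PySem.Dict.mk clicks).items.foldl (pvBestStep click_num) none with
     | none => none
     | some best => some best.2) = pvCanon click_num clicks := by
  simp only [pvCanon]
  set d := PySem.Dict.mk clicks with hd
  set cands := d.keys.filter (fun c => decide (c ≤ click_num)) with hcands
  obtain ⟨-, hres, hbound⟩ := pvFold_spec click_num d.items none
  cases hr : d.items.foldl (pvBestStep click_num) none with
  | none =>
    -- no key ≤ click_num at all, so cands = []
    have hce : cands = [] := by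
      rw [hcands]
      by_contra hne
      obtain ⟨k, hk⟩ := List.exists_mem_of_ne_nil _ hne
      have hk' := List.mem_filter.mp hk
      have hkn : k ≤ click_num := by simpa using hk'.2
      obtain ⟨q, hq, hq1⟩ := List.mem_map.mp hk'.1
      obtain ⟨p, hp, -⟩ := hbound q hq (hq1 ▸ hkn)
      simp [hr] at hp
    simp [hce, PySem.List.max?]
  | some p =>
    rcases hres p hr with h | ⟨hpn, hfind, -⟩
    · exact absurd h (by simp)
    have hpd : p ∈ d.items := List.mem_of_find?_eq_some hfind
    have hpc : p.1 ∈ cands := by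
      rw [hcands]
      exact List.mem_filter.mpr ⟨List.mem_map_of_mem hpd, by simpa using hpn⟩
    have hne : cands ≠ [] := fun h => by simp [h] at hpc
    obtain ⟨m, hm⟩ : ∃ m, PySem.List.max? cands (fun x => x) = some m := by
      cases h : PySem.List.max? cands (fun x => x) with
      | none => exact absurd ((PySem.List.max?_eq_none_iff _ _).mp h) hne
      | some m => exact ⟨m, rfl⟩
    have hmm : m ∈ cands := PySem.List.max?_mem hm
    have hmk := List.mem_filter.mp (hcands ▸ hmm)
    obtain ⟨q, hq, hq1⟩ := List.mem_map.mp hmk.1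
    have hmn : m ≤ click_num := by simpa using hmk.2
    obtain ⟨p', hp', hle⟩ := hbound q hq (hq1 ▸ hmn)
    rw [hr] at hp'
    cases hp'
    have h1 : m ≤ p.1 := hq1 ▸ hle
    have h2 : p.1 ≤ m := PySem.List.max?_isMax hm p.1 hpc
    have hmp : m = p.1 := le_antisymm h1 h2
    have : d.get? m = some p.2 := by
      simp only [PySem.Dict.get?, hmp, hfind, Option.map_some]
    simp [hm, this]

-- ===== VERDICT (by name: the statement is the Claim_ definition above) =====
theorem get_image_for_segment_py_spec : Claim_equal_get_image_for_segment_py := by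
  intro slide_num click_num mapping _
  unfold Spec_get_image_for_segment_py get_image_for_segment_py get_image_for_segment_py_alt
  cases (PySem.Dict.mk mapping).get? slide_num with
  | none => rfl
  | some inner => exact (pvA_inner click_num inner).trans (pvB_inner click_num inner).symm
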